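-- pv_equiv track=rewrite | github.com/MrKrishnabhagat/Gplan | updated.py | create_room_block
-- ===== SOURCE A (Python) =====
-- def create_l_shaped_block(length, width):
--     """Create an L-shaped block with given dimensions"""
--     if length < 3 or width < 3:
--         return None
--
--     block = [[1 for _ in range(width)] for _ in range(length)]
--     corner_height = length // 2
--     corner_width = width // 2
--
--     for i in range(corner_height):
--         for j in range(width - corner_width, width):
--             block[i][j] = 0
--
--     return block
--
-- def create_t_shaped_block(length, width):
--     """Create a T-shaped block with given dimensions"""
--     if length < 3 or width < 3:
--         return None
--
--     block = [[0 for _ in range(width)] for _ in range(length)]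
--     top_height = length // 3
--
--     for i in range(top_height):
--         for j in range(width):
--             block[i][j] = 1
--
--     stem_start = width // 3
--     stem_end = 2 * width // 3
--     for i in range(top_height, length):
--         for j in range(stem_start, stem_end):
--             block[i][j] = 1
--
--     return block
--
-- def create_room_block(room_type, length, width, shape="rectangle"):
--     """Create a block based on room type and shape"""
--     if shape == "rectangle":
--         return [[1 for _ in range(width)] for _ in range(length)]
--     elif shape == "L-shaped":
--         return create_l_shaped_block(length, width)
--     elif shape == "T-shaped":
--         return create_t_shaped_block(length, width)
--     else:
--         return [[1 for _ in range(width)] for _ in range(length)]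
-- ===== SOURCE B (Python) =====
-- def create_room_block(room_type, length, width, shape="rectangle"):
--     """Create a block based on room type and shape"""
--     if shape == "L-shaped":
--         if length < 3 or width < 3:
--             return None
--         ch, cw = length // 2, width // 2
--         return [[0 if i < ch and j >= width - cw else 1 for j in range(width)]
--                 for i in range(length)]
--     if shape == "T-shaped":
--         if length < 3 or width < 3:
--             return None
--         th, ss, se = length // 3, width // 3, 2 * width // 3
--         return [[1 if i < th or ss <= j < se else 0 for j in range(width)]
--                 for i in range(length)]
--     return [[1] * width for _ in range(length)]
-- ===== Notes on version B (the rewrite author's own statement) =====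
-- stated objective: simpler
-- what changed: Each shape's grid is built in one nested comprehension that decides every cell from a coordinate predicate (and [1]*width rows for rectangles), instead of allocating a uniform grid and then overwriting subregions with nested index loops.
import Mathlib
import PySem

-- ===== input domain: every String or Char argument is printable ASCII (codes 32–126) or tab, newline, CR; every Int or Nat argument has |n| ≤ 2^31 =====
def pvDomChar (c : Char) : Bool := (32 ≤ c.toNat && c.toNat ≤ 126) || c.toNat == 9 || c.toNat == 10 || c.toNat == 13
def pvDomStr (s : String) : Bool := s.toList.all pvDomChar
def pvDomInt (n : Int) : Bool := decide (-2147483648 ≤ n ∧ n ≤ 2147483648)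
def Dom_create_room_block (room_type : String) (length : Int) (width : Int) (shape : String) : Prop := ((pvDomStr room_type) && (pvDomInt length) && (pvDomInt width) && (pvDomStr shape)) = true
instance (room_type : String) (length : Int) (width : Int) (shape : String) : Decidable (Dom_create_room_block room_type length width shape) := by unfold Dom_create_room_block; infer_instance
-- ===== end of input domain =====

-- B replaces A's allocate-then-overwrite nested index loops by a per-cell coordinate
-- predicate evaluated in a single nested comprehension (objective: simpler).

-- ===== PORT A =====
def create_l_shaped_block (length : Int) (width : Int) : Option (List (List Int)) :=
  if length < 3 ∨ width < 3 then none
  else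
    let block := (PySem.List.pyRange 0 length 1).map
      (fun _ => (PySem.List.pyRange 0 width 1).map (fun _ => (1 : Int)))
    let corner_height := PySem.Int.floordiv length 2
    let corner_width := PySem.Int.floordiv width 2
    some ((PySem.List.pyRange 0 corner_height 1).foldl (fun b i =>
      (PySem.List.pyRange (width - corner_width) width 1).foldl (fun b j =>
        PySem.List.pySetD b i (PySem.List.pySetD (PySem.List.pyGetD b i []) j 0)) b) block)

def create_t_shaped_block (length : Int) (width : Int) : Option (List (List Int)) :=
  if length < 3 ∨ width < 3 then none
  else
    let block := (PySem.List.pyRange 0 length 1).map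
      (fun _ => (PySem.List.pyRange 0 width 1).map (fun _ => (0 : Int)))
    let top_height := PySem.Int.floordiv length 3
    let block := (PySem.List.pyRange 0 top_height 1).foldl (fun b i =>
      (PySem.List.pyRange 0 width 1).foldl (fun b j =>
        PySem.List.pySetD b i (PySem.List.pySetD (PySem.List.pyGetD b i []) j 1)) b) block
    let stem_start := PySem.Int.floordiv width 3
    let stem_end := PySem.Int.floordiv (2 * width) 3
    some ((PySem.List.pyRange top_height length 1).foldl (fun b i =>
      (PySem.List.pyRange stem_start stem_end 1).foldl (fun b j =>
        PySem.List.pySetD b i (PySem.List.pySetD (PySem.List.pyGetD b i []) j 1)) b) block)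

def create_room_block (room_type : String) (length : Int) (width : Int) (shape : String) : Option (List (List Int)) :=
  if shape == "rectangle" then
    some ((PySem.List.pyRange 0 length 1).map
      (fun _ => (PySem.List.pyRange 0 width 1).map (fun _ => (1 : Int))))
  else if shape == "L-shaped" then
    create_l_shaped_block length width
  else if shape == "T-shaped" then
    create_t_shaped_block length width
  else
    some ((PySem.List.pyRange 0 length 1).map
      (fun _ => (PySem.List.pyRange 0 width 1).map (fun _ => (1 : Int))))

-- ===== PORT B =====
def create_room_block_alt (room_type : String) (length : Int) (width : Int) (shape : String) : Option (List (List Int)) :=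
  if shape == "L-shaped" then
    if length < 3 ∨ width < 3 then none
    else
      let ch := PySem.Int.floordiv length 2
      let cw := PySem.Int.floordiv width 2
      some ((PySem.List.pyRange 0 length 1).map (fun i =>
        (PySem.List.pyRange 0 width 1).map (fun j =>
          if i < ch ∧ width - cw ≤ j then (0 : Int) else 1)))
  else if shape == "T-shaped" then
    if length < 3 ∨ width < 3 then none
    else
      let th := PySem.Int.floordiv length 3
      let ss := PySem.Int.floordiv width 3
      let se := PySem.Int.floordiv (2 * width) 3
      some ((PySem.List.pyRange 0 length 1).map (fun i =>
        (PySem.List.pyRange 0 width 1).map (fun j =>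
          if i < th ∨ (ss ≤ j ∧ j < se) then (1 : Int) else 0)))
  else
    some ((PySem.List.pyRange 0 length 1).map
      (fun _ => PySem.List.pyRepeat [(1 : Int)] width))

-- ===== PRECONDITION & SPEC =====
def Spec_create_room_block (room_type : String) (length : Int) (width : Int) (shape : String) (out : Option (List (List Int))) : Prop := out = create_room_block_alt room_type length width shape
instance (room_type : String) (length : Int) (width : Int) (shape : String) (out : Option (List (List Int))) : Decidable (Spec_create_room_block room_type length width shape out) := by unfold Spec_create_room_block; infer_instance

-- ===== CLAIM (what is proved, stated in full; the proofs are below) =====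
def Claim_equal_create_room_block : Prop := ∀ (room_type : String) (length : Int) (width : Int) (shape : String), Dom_create_room_block room_type length width shape → Spec_create_room_block room_type length width shape (create_room_block room_type length width shape)

-- ===== LEMMAS AND PROOFS =====

-- the inner row-update loop of a fixed row r: sets each index of js to v
lemma pv_row_foldl (v : Int) : ∀ (js : List Int), (∀ j ∈ js, 0 ≤ j) → ∀ (r : List Int) (k : Nat),
    (js.foldl (fun r j => PySem.List.pySetD r j v) r)[k]? =
      if (k : Int) ∈ js then r[k]?.map (fun _ => v) else r[k]? := by
  intro js
  induction js with
  | nil => intro _ r k; simp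
  | cons j js ih =>
      intro hj r k
      have hj0 : 0 ≤ j := hj j (by simp)
      simp only [List.foldl_cons]
      rw [ih (fun x hx => hj x (by simp [hx])) (PySem.List.pySetD r j v) k]
      rw [PySem.List.pySetD_of_nonneg r v hj0]
      by_cases hkj : (k : Int) = j
      · have hkn : k = j.toNat := by omega
        subst hkn
        by_cases hmem : ((j.toNat : Int)) ∈ js <;>
        · by_cases hlt : j.toNat < r.length
          · simp [hkj, List.getElem?_set_self hlt, List.getElem?_eq_getElem hlt]
          · have h1 : r[j.toNat]? = none := by
              rw [List.getElem?_eq_none_iff]; omega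
            have h2 : (r.set j.toNat v)[j.toNat]? = none := by
              rw [List.getElem?_eq_none_iff]; simp; omega
            simp [hkj, h1, h2]
      · have hkn : k ≠ j.toNat := by omega
        have hne : (r.set j.toNat v)[k]? = r[k]? := List.getElem?_set_ne (by omega)
        by_cases hmem : (k : Int) ∈ js <;> simp [hmem, hkj, hne]

-- the inner loop 'for j in js: b[i][j] = v' is one in-place update of row i
lemma pv_inner_foldl (v : Int) (i : Int) (hi : 0 ≤ i) : ∀ (js : List Int) (b : List (List Int)), i.toNat < b.length →
    js.foldl (fun b j => PySem.List.pySetD b i (PySem.List.pySetD (PySem.List.pyGetD b i []) j v)) b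
      = PySem.List.pySetD b i
          (js.foldl (fun r j => PySem.List.pySetD r j v) (PySem.List.pyGetD b i [])) := by
  intro js
  induction js with
  | nil =>
      intro b hb
      have hib : i < (b.length : Int) := by omega
      rw [PySem.List.pyGetD_eq_getElem b [] hi hib, PySem.List.pySetD_of_nonneg b _ hi]
      simp [List.foldl_nil, List.set_getElem_self]
  | cons j js ih =>
      intro b hb
      have hib : i < (b.length : Int) := by omega
      have hg : PySem.List.pyGetD b i [] = b[i.toNat] :=
        PySem.List.pyGetD_eq_getElem b [] hi hib
      simp only [List.foldl_cons]
      rw [ih _ (by rw [PySem.List.length_pySetD]; exact hb)]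
      rw [hg, PySem.List.pySetD_of_nonneg b (PySem.List.pySetD b[i.toNat] j v) hi]
      have hg2 : PySem.List.pyGetD (b.set i.toNat (PySem.List.pySetD b[i.toNat] j v)) i []
          = PySem.List.pySetD b[i.toNat] j v := by
        rw [PySem.List.pyGetD_eq_getElem _ [] hi (by simpa using hib)]
        simp
      rw [hg2, PySem.List.pySetD_of_nonneg _ _ hi, PySem.List.pySetD_of_nonneg _ _ hi,
          List.set_set]

-- outer loop over distinct row indices: per-row characterisation by getElem?
lemma pv_grid_foldl (v : Int) (js : List Int) :
    ∀ (is : List Int), is.Nodup → ∀ (b : List (List Int)),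
      (∀ i ∈ is, 0 ≤ i ∧ i < (b.length : Int)) → ∀ (k : Nat),
    (is.foldl (fun b i => js.foldl (fun b j =>
        PySem.List.pySetD b i (PySem.List.pySetD (PySem.List.pyGetD b i []) j v)) b) b)[k]? =
      if (k : Int) ∈ is then
        b[k]?.map (fun r => js.foldl (fun r j => PySem.List.pySetD r j v) r)
      else b[k]? := by
  intro is
  induction is with
  | nil => intro _ b _ k; simp
  | cons i is ih =>
      intro hnd b hb k
      have hi := hb i (by simp)
      have hilen : i.toNat < b.length := by omega
      simp only [List.foldl_cons]
      rw [pv_inner_foldl v i hi.1 js b hilen]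
      have hg : PySem.List.pyGetD b i [] = b[i.toNat] :=
        PySem.List.pyGetD_eq_getElem b [] hi.1 hi.2
      rw [hg, PySem.List.pySetD_of_nonneg b _ hi.1]
      rw [ih (List.nodup_cons.mp hnd).2 _
            (by intro x hx; rw [List.length_set]; exact hb x (by simp [hx])) k]
      by_cases hki : (k : Int) = i
      · have hkn : k = i.toNat := by omega
        have hknotin : (k : Int) ∉ is := by rw [hki]; exact (List.nodup_cons.mp hnd).1
        subst hkn
        rw [if_neg hknotin, if_pos (by simp [hki]),
            List.getElem?_set_self hilen, List.getElem?_eq_getElem hilen]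
        simp
      · have hkn : k ≠ i.toNat := by omega
        have hne : (b.set i.toNat (js.foldl (fun r j => PySem.List.pySetD r j v) b[i.toNat]))[k]?
            = b[k]? := List.getElem?_set_ne (by omega)
        by_cases hmem : (k : Int) ∈ is <;> simp [hmem, hki, hne]

-- lengths are preserved by the nested update loops
lemma pv_inner_length (v : Int) (i : Int) : ∀ (js : List Int) (b : List (List Int)),
    (js.foldl (fun b j => PySem.List.pySetD b i (PySem.List.pySetD (PySem.List.pyGetD b i []) j v)) b).length = b.length := by
  intro js
  induction js with
  | nil => intro b; rfl
  | cons j js ih => intro b; simp only [List.foldl_cons]; rw [ih, PySem.List.length_pySetD]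

lemma pv_grid_length (v : Int) (js : List Int) : ∀ (is : List Int) (b : List (List Int)),
    (is.foldl (fun b i => js.foldl (fun b j =>
        PySem.List.pySetD b i (PySem.List.pySetD (PySem.List.pyGetD b i []) j v)) b) b).length = b.length := by
  intro is
  induction is with
  | nil => intro b; rfl
  | cons i is ih => intro b; simp only [List.foldl_cons]; rw [ih, pv_inner_length]

-- the rectangle / default branch: all-ones comprehension = replicated row
lemma pv_rect (length width : Int) :
    (PySem.List.pyRange 0 length 1).map
        (fun _ => (PySem.List.pyRange 0 width 1).map (fun _ => (1 : Int)))
      = (PySem.List.pyRange 0 length 1).map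
        (fun _ => PySem.List.pyRepeat [(1 : Int)] width) := by
  have h : (PySem.List.pyRange 0 width 1).map (fun _ => (1 : Int))
      = PySem.List.pyRepeat [(1 : Int)] width := by
    rw [PySem.List.pyRepeat_singleton, List.map_const', PySem.List.length_pyRange_one,
        Int.sub_zero]
  rw [h]

-- the L-shaped branch: A's update loops equal B's per-cell comprehension
lemma pv_L (length width : Int) (h3 : 3 ≤ length) (h4 : 3 ≤ width) :
    (PySem.List.pyRange 0 (PySem.Int.floordiv length 2) 1).foldl (fun b i =>
      (PySem.List.pyRange (width - PySem.Int.floordiv width 2) width 1).foldl (fun b j =>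
        PySem.List.pySetD b i (PySem.List.pySetD (PySem.List.pyGetD b i []) j 0)) b)
      ((PySem.List.pyRange 0 length 1).map
        (fun _ => (PySem.List.pyRange 0 width 1).map (fun _ => (1 : Int))))
    = (PySem.List.pyRange 0 length 1).map (fun i =>
        (PySem.List.pyRange 0 width 1).map (fun j =>
          if i < PySem.Int.floordiv length 2 ∧ width - PySem.Int.floordiv width 2 ≤ j
          then (0 : Int) else 1)) := by
  have hch : PySem.Int.floordiv length 2 = length / 2 :=
    PySem.Int.floordiv_eq_ediv_of_pos (by norm_num)
  have hcw : PySem.Int.floordiv width 2 = width / 2 :=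
    PySem.Int.floordiv_eq_ediv_of_pos (by norm_num)
  rw [hch, hcw]
  apply List.ext_getElem?
  intro k
  rw [pv_grid_foldl 0 _ _ (PySem.List.nodup_pyRange_one _ _) _
      (by intro i hi
          rw [PySem.List.mem_pyRange_one] at hi
          rw [List.length_map, PySem.List.length_pyRange_one]
          exact ⟨hi.1, by omega⟩) k]
  rw [List.getElem?_map, List.getElem?_map, PySem.List.getElem?_pyRange_one]
  by_cases hk : k < (length - 0).toNat
  · rw [if_pos hk]
    by_cases hkc : (k : Int) ∈ PySem.List.pyRange 0 (length / 2) 1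
    · rw [if_pos hkc]
      rw [PySem.List.mem_pyRange_one] at hkc
      simp only [Option.map_some, zero_add, Option.some.injEq]
      apply List.ext_getElem?
      intro m
      rw [pv_row_foldl 0 _
          (by intro j hj; rw [PySem.List.mem_pyRange_one] at hj; omega) _ m]
      rw [List.getElem?_map, List.getElem?_map, PySem.List.getElem?_pyRange_one]
      by_cases hm : m < (width - 0).toNat
      · rw [if_pos hm]
        by_cases hms : (m : Int) ∈ PySem.List.pyRange (width - width / 2) width 1
        · rw [if_pos hms]
          rw [PySem.List.mem_pyRange_one] at hms
          simp only [Option.map_some, zero_add, Option.some.injEq]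
          rw [if_pos (by constructor <;> omega)]
        · rw [if_neg hms]
          rw [PySem.List.mem_pyRange_one] at hms
          simp only [Option.map_some, zero_add, Option.some.injEq]
          rw [if_neg (by omega)]
      · rw [if_neg hm]; simp
    · rw [if_neg hkc]
      rw [PySem.List.mem_pyRange_one] at hkc
      simp only [Option.map_some, zero_add, Option.some.injEq]
      apply List.ext_getElem?
      intro m
      rw [List.getElem?_map, List.getElem?_map, PySem.List.getElem?_pyRange_one]
      by_cases hm : m < (width - 0).toNat
      · rw [if_pos hm]
        simp only [Option.map_some, zero_add, Option.some.injEq]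
        rw [if_neg (by omega)]
      · rw [if_neg hm]; simp
  · rw [if_neg hk]
    simp
 
-- the T-shaped branch: A's two update loops equal B's per-cell comprehension
lemma pv_T (length width : Int) (h3 : 3 ≤ length) (h4 : 3 ≤ width) :
    (PySem.List.pyRange (PySem.Int.floordiv length 3) length 1).foldl (fun b i =>
      (PySem.List.pyRange (PySem.Int.floordiv width 3) (PySem.Int.floordiv (2 * width) 3) 1).foldl (fun b j =>
        PySem.List.pySetD b i (PySem.List.pySetD (PySem.List.pyGetD b i []) j 1)) b)
      ((PySem.List.pyRange 0 (PySem.Int.floordiv length 3) 1).foldl (fun b i =>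
        (PySem.List.pyRange 0 width 1).foldl (fun b j =>
          PySem.List.pySetD b i (PySem.List.pySetD (PySem.List.pyGetD b i []) j 1)) b)
        ((PySem.List.pyRange 0 length 1).map
          (fun _ => (PySem.List.pyRange 0 width 1).map (fun _ => (0 : Int)))))
    = (PySem.List.pyRange 0 length 1).map (fun i =>
        (PySem.List.pyRange 0 width 1).map (fun j =>
          if i < PySem.Int.floordiv length 3 ∨
             (PySem.Int.floordiv width 3 ≤ j ∧ j < PySem.Int.floordiv (2 * width) 3)
          then (1 : Int) else 0)) := by
  have hth : PySem.Int.floordiv length 3 = length / 3 :=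
    PySem.Int.floordiv_eq_ediv_of_pos (by norm_num)
  have hss : PySem.Int.floordiv width 3 = width / 3 :=
    PySem.Int.floordiv_eq_ediv_of_pos (by norm_num)
  have hse : PySem.Int.floordiv (2 * width) 3 = 2 * width / 3 :=
    PySem.Int.floordiv_eq_ediv_of_pos (by norm_num)
  rw [hth, hss, hse]
  apply List.ext_getElem?
  intro k
  rw [pv_grid_foldl 1 _ _ (PySem.List.nodup_pyRange_one _ _) _
      (by intro i hi
          rw [PySem.List.mem_pyRange_one] at hi
          rw [pv_grid_length, List.length_map, PySem.List.length_pyRange_one]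
          exact ⟨by omega, by omega⟩) k]
  rw [pv_grid_foldl 1 _ _ (PySem.List.nodup_pyRange_one _ _) _
      (by intro i hi
          rw [PySem.List.mem_pyRange_one] at hi
          rw [List.length_map, PySem.List.length_pyRange_one]
          exact ⟨hi.1, by omega⟩) k]
  rw [List.getElem?_map, List.getElem?_map, PySem.List.getElem?_pyRange_one]
  by_cases hk : k < (length - 0).toNat
  · rw [if_pos hk]
    by_cases htop : (k : Int) < length / 3
    · -- top band: first loop filled the row with 1s; second loop skips it
      rw [if_neg (by rw [PySem.List.mem_pyRange_one]; omega),
          if_pos (by rw [PySem.List.mem_pyRange_one]; exact ⟨by omega, htop⟩)]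
      simp only [Option.map_some, zero_add, Option.some.injEq]
      apply List.ext_getElem?
      intro m
      rw [pv_row_foldl 1 _
          (by intro j hj; rw [PySem.List.mem_pyRange_one] at hj; omega) _ m]
      rw [List.getElem?_map, List.getElem?_map, PySem.List.getElem?_pyRange_one]
      by_cases hm : m < (width - 0).toNat
      · rw [if_pos hm, if_pos (by rw [PySem.List.mem_pyRange_one]; exact ⟨by omega, by omega⟩)]
        simp only [Option.map_some, zero_add, Option.some.injEq]
        rw [if_pos (Or.inl htop)]
      · rw [if_neg hm]; simp
    · -- stem band: row untouched by the first loop, stem set by the second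
      rw [if_pos (by rw [PySem.List.mem_pyRange_one]; exact ⟨by omega, by omega⟩),
          if_neg (by rw [PySem.List.mem_pyRange_one]; omega)]
      simp only [Option.map_some, zero_add, Option.some.injEq]
      apply List.ext_getElem?
      intro m
      rw [pv_row_foldl 1 _
          (by intro j hj; rw [PySem.List.mem_pyRange_one] at hj; omega) _ m]
      rw [List.getElem?_map, List.getElem?_map, PySem.List.getElem?_pyRange_one]
      by_cases hm : m < (width - 0).toNat
      · rw [if_pos hm]
        by_cases hms : (m : Int) ∈ PySem.List.pyRange (width / 3) (2 * width / 3) 1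
        · rw [if_pos hms]
          rw [PySem.List.mem_pyRange_one] at hms
          simp only [Option.map_some, zero_add, Option.some.injEq]
          rw [if_pos (Or.inr ⟨by omega, by omega⟩)]
        · rw [if_neg hms]
          rw [PySem.List.mem_pyRange_one] at hms
          simp only [Option.map_some, zero_add, Option.some.injEq]
          rw [if_neg (by omega)]
      · rw [if_neg hm]; simp
  · rw [if_neg hk]
    simp

-- ===== VERDICT (by name: the statement is the Claim_ definition above) =====
theorem create_room_block_spec : Claim_equal_create_room_block := by
  intro room_type length width shape _
  unfold Spec_create_room_block create_room_block create_room_block_alt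
    create_l_shaped_block create_t_shaped_block
  by_cases h1 : (shape == "rectangle") = true
  · have h2 : ¬ (shape == "L-shaped") = true := by
      simp only [beq_iff_eq] at *; subst h1; decide
    have h3 : ¬ (shape == "T-shaped") = true := by
      simp only [beq_iff_eq] at *; subst h1; decide
    rw [if_pos h1, if_neg h2, if_neg h3, Option.some.injEq]
    exact pv_rect length width
  · by_cases h2 : (shape == "L-shaped") = true
    · rw [if_neg h1, if_pos h2, if_pos h2]
      by_cases hg : length < 3 ∨ width < 3
      · rw [if_pos hg, if_pos hg]
      · rw [if_neg hg, if_neg hg, Option.some.injEq]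
        exact pv_L length width (by omega) (by omega)
    · by_cases h3 : (shape == "T-shaped") = true
      · rw [if_neg h1, if_neg h2, if_pos h3, if_neg h2, if_pos h3]
        by_cases hg : length < 3 ∨ width < 3
        · rw [if_pos hg, if_pos hg]
        · rw [if_neg hg, if_neg hg, Option.some.injEq]
          exact pv_T length width (by omega) (by omega)
      · rw [if_neg h1, if_neg h2, if_neg h3, if_neg h2, if_neg h3, Option.some.injEq]
        exact pv_rect length width
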